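-- pv_equiv track=rewrite | github.com/st-pauls-school/bio | 2016/q1/python/promenade.py | promenade
-- ===== SOURCE A (Python) =====
-- def promenade(prom):
--     # a dictionary of previous positions
--     previous = {'':(1,1)}
--     for i in range(len(prom)):
--         # what's the character we're looking at now
--         current = prom[i]
--         # so we know the other one
--         other = 'L' if current == 'R' else 'R'
--
--         # what's the pattern before the current character (it will be in the dictionary)
--         beforecurrent = prom[:i]
--
--         n1,d1 = previous[beforecurrent] # get the numerator and denominator for the previous pattern
--
--         # if the other character has not been seen before
--         if other not in beforecurrent:
--             n2,d2 = (1,0) if other == 'L' else (0,1) # get the L/R specific unseen numerator and denominator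
--         else:
--             # otherwise use rindex to find the last index of the last instance of the other character in the beforecurrent string
--             n2,d2 = previous[beforecurrent[:beforecurrent.rindex(other)]]
--
--         # add the whole pattern to the dictionary
--         previous[beforecurrent+current] = (n1+n2),(d1+d2)
--
--     return previous[prom]
-- ===== SOURCE B (Python) =====
-- def promenade(prom):
--     # single left-to-right pass: running value plus the value stored just
--     # before the last 'L' / last 'R' seen so far (defaults (1,0) / (0,1))
--     cur = (1, 1)
--     last_l = (1, 0)
--     last_r = (0, 1)
--     for c in prom:
--         o = last_l if c == 'R' else last_r
--         if c == 'L':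
--             last_l = cur
--         elif c == 'R':
--             last_r = cur
--         cur = (cur[0] + o[0], cur[1] + o[1])
--     return cur
-- ===== Notes on version B (the rewrite author's own statement) =====
-- stated objective: faster
-- what changed: A builds a dict keyed by every string prefix and, per character, slices prom[:i] and calls rindex; B does one left-to-right pass keeping only the running (n,d) pair and the pair stored just before the last 'L' and last 'R', so no prefix strings, slicing or rindex at all.
import Mathlib
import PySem

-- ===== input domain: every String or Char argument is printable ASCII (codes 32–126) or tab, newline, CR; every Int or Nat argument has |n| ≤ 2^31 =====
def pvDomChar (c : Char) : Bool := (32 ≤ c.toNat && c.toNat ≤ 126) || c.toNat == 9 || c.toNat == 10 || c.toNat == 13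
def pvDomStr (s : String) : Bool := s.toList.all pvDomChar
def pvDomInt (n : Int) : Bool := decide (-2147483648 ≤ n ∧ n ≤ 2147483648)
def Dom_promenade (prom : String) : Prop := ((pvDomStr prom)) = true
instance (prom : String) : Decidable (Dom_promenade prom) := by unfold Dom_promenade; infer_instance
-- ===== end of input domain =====

-- B replaces A's dictionary of all string prefixes (with slicing and rindex at every
-- step) by a single pass keeping the running value and the values stored just before
-- the last 'L' / last 'R'; both return the (numerator, denominator) pair as [n, d].

-- ===== PORT A =====
-- s.rindex(c): index of the LAST occurrence of c in cs (junk value when absent; A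
-- only calls it after checking 'other in beforecurrent', so that case is unreached).
def pvRindex (cs : List Char) (c : Char) : Nat :=
  cs.length - 1 - List.idxOf c cs.reverse

-- one iteration of A's 'for i in range(len(prom))' body (dict keys are the prefix
-- strings, modelled as List Char; prom[:i] with 0 ≤ i < len(prom) is take i.toNat;
-- the dict lookups use getD with a junk default — A's keys are always present).
def pvStepA (cs : List Char) (prev : PySem.Dict (List Char) (Int × Int)) (i : Int) :
    PySem.Dict (List Char) (Int × Int) :=
  let current := PySem.List.pyGetD cs i ' '
  let other := if current = 'R' then 'L' else 'R'
  let beforecurrent := cs.take i.toNat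
  let p1 := prev.getD beforecurrent (0, 0)
  let p2 :=
    if other ∉ beforecurrent then
      (if other = 'L' then ((1 : Int), (0 : Int)) else (0, 1))
    else
      prev.getD (beforecurrent.take (pvRindex beforecurrent other)) (0, 0)
  prev.insert (beforecurrent ++ [current]) (p1.1 + p2.1, p1.2 + p2.2)

def promenade (prom : String) : List Int :=
  let cs := prom.toList
  let previous : PySem.Dict (List Char) (Int × Int) := PySem.Dict.empty.insert [] (1, 1)
  let previous := (PySem.List.pyRange 0 (cs.length : Int) 1).foldl (pvStepA cs) previous
  let r := previous.getD cs (0, 0)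
  [r.1, r.2]

-- ===== PORT B =====
-- B's loop state: (current value, value before last 'L', value before last 'R')
def pvStepB (st : (Int × Int) × (Int × Int) × (Int × Int)) (c : Char) :
    (Int × Int) × (Int × Int) × (Int × Int) :=
  let cur := st.1
  let lastL := st.2.1
  let lastR := st.2.2
  let o := if c = 'R' then lastL else lastR
  let lastL' := if c = 'L' then cur else lastL
  let lastR' := if c ≠ 'L' ∧ c = 'R' then cur else lastR   -- Python's 'elif'
  ((cur.1 + o.1, cur.2 + o.2), lastL', lastR')

def promenade_alt (prom : String) : List Int :=
  let s := prom.toList.foldl pvStepB ((1, 1), (1, 0), (0, 1))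
  [s.1.1, s.1.2]

-- ===== PRECONDITION & SPEC =====
def Spec_promenade (prom : String) (out : List Int) : Prop := out = promenade_alt prom
instance (prom : String) (out : List Int) : Decidable (Spec_promenade prom out) := by unfold Spec_promenade; infer_instance

-- ===== CLAIM (what is proved, stated in full; the proofs are below) =====
def Claim_equal_promenade : Prop := ∀ (prom : String), Dom_promenade prom → Spec_promenade prom (promenade prom)

-- ===== LEMMAS AND PROOFS =====

-- A's dict after the whole loop, as a function of the character list
def pvAloop (cs : List Char) : PySem.Dict (List Char) (Int × Int) :=
  (PySem.List.pyRange 0 (cs.length : Int) 1).foldl (pvStepA cs) (PySem.Dict.empty.insert [] (1, 1))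

-- B's state after the whole loop
def pvBloop (cs : List Char) : (Int × Int) × (Int × Int) × (Int × Int) :=
  cs.foldl pvStepB ((1, 1), (1, 0), (0, 1))

theorem pvRindex_snoc_self (ds : List Char) (c : Char) :
    pvRindex (ds ++ [c]) c = ds.length := by
  simp [pvRindex, List.idxOf_cons_self]

theorem pvRindex_snoc_ne (ds : List Char) (c c' : Char) (h : c' ≠ c) (hm : c' ∈ ds) :
    pvRindex (ds ++ [c]) c' = pvRindex ds c' := by
  have hr : List.idxOf c' ((ds ++ [c]).reverse) = List.idxOf c' ds.reverse + 1 := by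
    rw [List.reverse_append]
    simp only [List.reverse_singleton, List.singleton_append]
    exact List.idxOf_cons_ne _ (Ne.symm h)
  have hlt : List.idxOf c' ds.reverse < ds.length := by
    have := List.idxOf_lt_length_of_mem (show c' ∈ ds.reverse by simpa using hm)
    simpa using this
  unfold pvRindex
  rw [hr]
  simp only [List.length_append, List.length_cons, List.length_nil]
  omega

theorem pvRindex_lt (ds : List Char) (c : Char) (h : c ∈ ds) :
    pvRindex ds c < ds.length := by
  have hlt : List.idxOf c ds.reverse < ds.length := by
    have := List.idxOf_lt_length_of_mem (show c ∈ ds.reverse by simpa using h)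
    simpa using this
  unfold pvRindex
  omega

-- pvAloop over a snoc: the first len(ds) iterations only read ds, the extra one is pvStepA at index len(ds)
theorem pvAloop_snoc (ds : List Char) (c : Char) :
    pvAloop (ds ++ [c]) = pvStepA (ds ++ [c]) (pvAloop ds) (ds.length : Int) := by
  unfold pvAloop
  have hlen : (((ds ++ [c]).length : Nat) : Int) = (ds.length : Int) + 1 := by
    simp [List.length_append]
  rw [hlen, PySem.List.pyRange_one_succ_right (by positivity), List.foldl_append]
  simp only [List.foldl_cons, List.foldl_nil]
  congr 1
  refine PySem.List.foldl_congr_mem _ _ _ _ ?_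
  intro acc i hi
  obtain ⟨h0, hn⟩ := PySem.List.mem_pyRange_one.mp hi
  have htn : i.toNat ≤ ds.length := by omega
  unfold pvStepA
  rw [PySem.List.pyGetD_of_nonneg _ _ h0, PySem.List.pyGetD_of_nonneg _ _ h0,
    List.take_append_of_le_length htn]
  have : (ds ++ [c]).getD i.toNat ' ' = ds.getD i.toNat ' ' := by
    have hlt : i.toNat < ds.length := by omega
    simp [List.getD, List.getElem?_append_left hlt]
  rw [this]

-- any key of length ≤ len(ds) is distinct from the inserted key ds ++ [c]
theorem pvKeyNe (ds : List Char) (c : Char) (k : List Char) (hk : k.length ≤ ds.length) :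
    k ≠ ds ++ [c] := by
  intro h
  have := congrArg List.length h
  simp [List.length_append] at this
  omega

-- the main invariant relating A's prefix dictionary to B's three-value state
theorem pvMain (cs : List Char) :
    ((pvAloop cs).get? cs = some (pvBloop cs).1)
    ∧ ('L' ∈ cs → (pvAloop cs).get? (cs.take (pvRindex cs 'L')) = some (pvBloop cs).2.1)
    ∧ ('L' ∉ cs → (pvBloop cs).2.1 = (1, 0))
    ∧ ('R' ∈ cs → (pvAloop cs).get? (cs.take (pvRindex cs 'R')) = some (pvBloop cs).2.2)
    ∧ ('R' ∉ cs → (pvBloop cs).2.2 = (0, 1)) := by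
  induction cs using List.reverseRecOn with
  | nil => refine ⟨by decide, by simp, by decide, by simp, by decide⟩
  | append_singleton ds c ih =>
    obtain ⟨ih1, ih2, ih3, ih4, ih5⟩ := ih
    have hB : pvBloop (ds ++ [c]) = pvStepB (pvBloop ds) c := by
      simp [pvBloop, List.foldl_append]
    have hcur : PySem.List.pyGetD (ds ++ [c]) (ds.length : Int) ' ' = c := by
      rw [PySem.List.pyGetD_natCast]
      simp [List.getD]
    have htake : (ds ++ [c]).take ((ds.length : Int)).toNat = ds := by
      simp
    have hp1 : (pvAloop ds).getD ds (0, 0) = (pvBloop ds).1 := by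
      rw [PySem.Dict.getD_eq_get?_getD, ih1]; rfl
    have hp2 : (if (if c = 'R' then 'L' else 'R') ∉ ds then
          (if (if c = 'R' then 'L' else 'R') = 'L' then ((1 : Int), (0 : Int)) else (0, 1))
        else
          (pvAloop ds).getD (ds.take (pvRindex ds (if c = 'R' then 'L' else 'R'))) (0, 0)) =
        (if c = 'R' then (pvBloop ds).2.1 else (pvBloop ds).2.2) := by
      by_cases hc : c = 'R'
      · by_cases hm : 'L' ∈ ds
        · simp [hc, hm, PySem.Dict.getD_eq_get?_getD, ih2 hm]
        · simp [hc, hm, ih3 hm]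
      · by_cases hm : 'R' ∈ ds
        · simp [hc, hm, PySem.Dict.getD_eq_get?_getD, ih4 hm]
        · simp [hc, hm, ih5 hm]
    have hA : pvAloop (ds ++ [c]) = (pvAloop ds).insert (ds ++ [c])
        ((pvBloop ds).1.1 + (if c = 'R' then (pvBloop ds).2.1 else (pvBloop ds).2.2).1,
         (pvBloop ds).1.2 + (if c = 'R' then (pvBloop ds).2.1 else (pvBloop ds).2.2).2) := by
      rw [pvAloop_snoc]
      unfold pvStepA
      simp only [hcur, htake, hp1, hp2]
    refine ⟨?_, ?_, ?_, ?_, ?_⟩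
    · rw [hA, hB, PySem.Dict.get?_insert_self]
      simp [pvStepB]
    · intro hmem
      rw [hA, hB]
      by_cases hcL : c = 'L'
      · subst hcL
        rw [pvRindex_snoc_self,
          show (ds ++ ['L']).take ds.length = ds by
            rw [List.take_append_of_le_length le_rfl, List.take_length],
          PySem.Dict.get?_insert_of_ne _ _ (pvKeyNe ds 'L' ds le_rfl), ih1]
        simp [pvStepB]
      · have hm : 'L' ∈ ds := by
          rcases List.mem_append.mp hmem with hx | hx
          · exact hx
          · exact absurd (List.mem_singleton.mp hx) (fun he => hcL he.symm)
        have hlt := pvRindex_lt ds 'L' hm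
        rw [pvRindex_snoc_ne ds c 'L' (fun he => hcL he.symm) hm,
          List.take_append_of_le_length hlt.le,
          PySem.Dict.get?_insert_of_ne _ _ (pvKeyNe ds c _ (by simp)),
          ih2 hm]
        simp [pvStepB, hcL]
    · intro hnm
      have hcL : c ≠ 'L' := fun h => hnm (by simp [h])
      have hm : 'L' ∉ ds := fun h => hnm (List.mem_append_left _ h)
      rw [hB]
      simp [pvStepB, hcL, ih3 hm]
    · intro hmem
      rw [hA, hB]
      by_cases hcR : c = 'R'
      · subst hcR
        rw [pvRindex_snoc_self,
          show (ds ++ ['R']).take ds.length = ds by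
            rw [List.take_append_of_le_length le_rfl, List.take_length],
          PySem.Dict.get?_insert_of_ne _ _ (pvKeyNe ds 'R' ds le_rfl), ih1]
        simp [pvStepB]
      · have hm : 'R' ∈ ds := by
          rcases List.mem_append.mp hmem with hx | hx
          · exact hx
          · exact absurd (List.mem_singleton.mp hx) (fun he => hcR he.symm)
        have hlt := pvRindex_lt ds 'R' hm
        rw [pvRindex_snoc_ne ds c 'R' (fun he => hcR he.symm) hm,
          List.take_append_of_le_length hlt.le,
          PySem.Dict.get?_insert_of_ne _ _ (pvKeyNe ds c _ (by simp)),
          ih4 hm]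
        simp [pvStepB, hcR]
    · intro hnm
      have hcR : c ≠ 'R' := fun h => hnm (by simp [h])
      have hm : 'R' ∉ ds := fun h => hnm (List.mem_append_left _ h)
      rw [hB]
      simp [pvStepB, hcR, ih5 hm]

-- ===== VERDICT (by name: the statement is the Claim_ definition above) =====
theorem promenade_spec : Claim_equal_promenade := by
  intro prom _
  unfold Spec_promenade promenade promenade_alt
  have h := (pvMain prom.toList).1
  simp only [pvAloop, pvBloop] at h
  simp only [PySem.Dict.getD_eq_get?_getD, h, Option.getD_some]
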